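-- pv_equiv track=rewrite | github.com/VittorioRossetto/LLMsforSolverSelection | tools/unify_fzn_descriptions.py | _common_prefix_tokens
-- ===== SOURCE A (Python) =====
-- from typing import Dict, Iterable, List, Tuple
--
-- def _common_prefix_tokens(token_lists: List[List[str]]) -> List[str]:
--     if not token_lists:
--         return []
--
--     min_len = min(len(toks) for toks in token_lists)
--     prefix: List[str] = []
--     for i in range(min_len):
--         token = token_lists[0][i]
--         if all(toks[i] == token for toks in token_lists[1:]):
--             prefix.append(token)
--         else:
--             break
--     return prefix
-- ===== SOURCE B (Python) =====
-- from typing import List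
--
--
-- def _common_prefix_tokens(token_lists: List[List[str]]) -> List[str]:
--     if not token_lists:
--         return []
--     prefix = token_lists[0]
--     for toks in token_lists[1:]:
--         k = 0
--         for a, b in zip(prefix, toks):
--             if a != b:
--                 break
--             k += 1
--         prefix = prefix[:k]
--         if not prefix:
--             break
--     return list(prefix)
-- ===== Notes on version B (the rewrite author's own statement) =====
-- stated objective: alternative
-- what changed: Replaces A's column-by-column scan (min length first, then a per-position check across all lists) with a row-by-row fold that shrinks a running common prefix against each list via zip and breaks early once it becomes empty.
import Mathlib
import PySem

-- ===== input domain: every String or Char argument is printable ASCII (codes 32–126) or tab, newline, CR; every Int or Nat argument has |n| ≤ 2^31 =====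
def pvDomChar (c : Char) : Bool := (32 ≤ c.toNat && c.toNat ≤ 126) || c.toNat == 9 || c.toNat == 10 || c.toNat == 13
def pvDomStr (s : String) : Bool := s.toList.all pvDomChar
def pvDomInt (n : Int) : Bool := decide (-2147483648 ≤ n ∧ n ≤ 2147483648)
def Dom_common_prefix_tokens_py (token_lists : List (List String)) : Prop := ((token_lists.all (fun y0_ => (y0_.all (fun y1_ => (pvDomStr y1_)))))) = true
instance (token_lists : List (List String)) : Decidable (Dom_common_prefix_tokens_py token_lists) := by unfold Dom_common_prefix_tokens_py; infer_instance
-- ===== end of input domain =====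

-- B replaces A's column-by-column scan with a row-by-row fold of a shrinking prefix with early break (alternative decomposition, same asymptotic cost).

-- ===== PORT A =====
-- A's `for i in range(min_len)` loop with `break`: index recursion, accumulator `pfx`.
def cptA_go (tls : List (List String)) (minLen : Nat) (i : Nat) (pfx : List String) : List String :=
  if i < minLen then
    let token := (tls.headD []).getD i ""          -- token_lists[0][i] (in range: i < minLen ≤ each length)
    if (tls.drop 1).all (fun toks => toks.getD i "" == token) then
      cptA_go tls minLen (i + 1) (pfx ++ [token])
    else pfx                                        -- break
  else pfx
termination_by minLen - i

def common_prefix_tokens_py (token_lists : List (List String)) : List String :=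
  if token_lists.isEmpty then []
  else
    match PySem.List.min? (token_lists.map (fun toks => toks.length)) (fun x => x) with
    | none => []                                    -- unreachable: token_lists nonempty
    | some minLen => cptA_go token_lists minLen 0 []

-- ===== PORT B =====
-- k = number of leading equal pairs of zip(prefix, toks)
def zipCount : List String → List String → Nat
  | a :: as, b :: bs => if a == b then zipCount as bs + 1 else 0
  | _, _ => 0

-- the fold over token_lists[1:] with early break on empty prefix
def cptB_fold : List (List String)  → List String → List String
  | [], pfx => pfx
  | toks :: rest, pfx =>
    let pfx' := pfx.take (zipCount pfx toks)
    if pfx'.isEmpty then pfx' else cptB_fold rest pfx'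

def common_prefix_tokens_py_alt (token_lists : List (List String)) : List String :=
  match token_lists with
  | [] => []
  | pfx :: rest => cptB_fold rest pfx               -- list(prefix) = identity on the value

-- ===== PRECONDITION & SPEC =====
def Spec_common_prefix_tokens_py (token_lists : List (List String)) (out : List String) : Prop := out = common_prefix_tokens_py_alt token_lists
instance (token_lists : List (List String)) (out : List String) : Decidable (Spec_common_prefix_tokens_py token_lists out) := by unfold Spec_common_prefix_tokens_py; infer_instance

-- ===== CLAIM (what is proved, stated in full; the proofs are below) =====
def Claim_equal_common_prefix_tokens_py : Prop := ∀ (token_lists : List (List String)), Dom_common_prefix_tokens_py token_lists → Spec_common_prefix_tokens_py token_lists (common_prefix_tokens_py token_lists)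

-- ===== LEMMAS AND PROOFS =====

-- the common characterisation: length of the common prefix of p with all of ts (clipped at p.length)
def Kf (p : List String) : List (List String) → Nat
  | [] => p.length
  | t :: ts => min (zipCount p t) (Kf p ts)

theorem zipCount_le_right (p t : List String) : zipCount p t ≤ t.length := by
  induction p generalizing t with
  | nil => cases t <;> simp [zipCount]
  | cons a as ih =>
    cases t with
    | nil => simp [zipCount]
    | cons b bs =>
      simp only [zipCount]
      split
      · have := ih bs; simp; omega
      · simp

theorem zipCount_take (n : Nat) (p t : List String) :
    zipCount (p.take n) t = min n (zipCount p t) := by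
  induction p generalizing n t with
  | nil => cases t <;> simp [zipCount]
  | cons a as ih =>
    cases n with
    | zero => simp [zipCount]
    | succ m =>
      cases t with
      | nil => simp [zipCount]
      | cons b bs =>
        simp only [List.take_succ_cons, zipCount]
        split
        · rw [ih]; omega
        · simp

theorem Kf_le_len (p : List String) (ts : List (List String)) : Kf p ts ≤ p.length := by
  induction ts with
  | nil => simp [Kf]
  | cons t ts ih => simp only [Kf]; omega

theorem Kf_le_mem (p t : List String) (ts : List (List String)) (h : t ∈ ts) :
    Kf p ts ≤ zipCount p t := by
  induction ts with
  | nil => cases h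
  | cons u us ih =>
    rcases List.mem_cons.mp h with h | h
    · subst h; simp [Kf]
    · have := ih h; simp only [Kf]; omega

theorem Kf_take (c : Nat) (p : List String) (ts : List (List String)) :
    Kf (p.take c) ts = min c (Kf p ts) := by
  induction ts with
  | nil => simp [Kf]
  | cons t ts ih => simp only [Kf, zipCount_take, ih]; omega

-- B's fold computes the clipped common-prefix length
theorem cptB_fold_eq (rest : List (List String)) (p : List String) :
    cptB_fold rest p = p.take (Kf p rest) := by
  induction rest generalizing p with
  | nil => simp [cptB_fold, Kf]
  | cons t ts ih =>
    simp only [cptB_fold, Kf]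
    split
    · next hEmpty =>
      have h : p.take (zipCount p t) = [] := by
        simpa using List.isEmpty_iff.mp hEmpty
      rcases List.take_eq_nil_iff.mp h with h0 | h0
      · rw [h0]; simp
      · subst h0; simp
    · rw [ih, Kf_take, List.take_take]
      congr 1
      omega

-- the head of each drop, when in range
theorem drop_cons_of_lt (l : List String) (i : Nat) (h : i < l.length) :
    l.drop i = l.getD i "" :: l.drop (i + 1) := by
  rw [List.getD_eq_getElem l "" h, List.drop_eq_getElem_cons h]

-- A's column check succeeding at position i shifts Kf by one
theorem Kf_shift (p : List String) (rest : List (List String)) (i : Nat)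
    (hp : i < p.length)
    (hlen : ∀ t ∈ rest, i < t.length)
    (hall : ∀ t ∈ rest, t.getD i "" = p.getD i "") :
    Kf (p.drop i) (rest.map (List.drop i)) =
      Kf (p.drop (i + 1)) (rest.map (List.drop (i + 1))) + 1 := by
  induction rest with
  | nil => simp [Kf]; omega
  | cons t ts ih =>
    simp only [List.map_cons, Kf]
    rw [ih (fun u hu => hlen u (List.mem_cons_of_mem _ hu))
          (fun u hu => hall u (List.mem_cons_of_mem _ hu))]
    have ht : i < t.length := hlen t (List.mem_cons_self ..)
    rw [drop_cons_of_lt p i hp, drop_cons_of_lt t i ht]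
    simp only [zipCount, hall t (List.mem_cons_self ..)]
    simp only [BEq.rfl, if_true]
    omega

-- A's column check failing at position i forces Kf = 0 via the offending list
theorem Kf_zero_of_mismatch (p : List String) (rest : List (List String)) (i : Nat)
    (hp : i < p.length) (t : List String) (ht : t ∈ rest) (hti : i < t.length)
    (hne : t.getD i "" ≠ p.getD i "") :
    Kf (p.drop i) (rest.map (List.drop i)) = 0 := by
  have hmem : t.drop i ∈ rest.map (List.drop i) := List.mem_map_of_mem ht
  have hle := Kf_le_mem (p.drop i) (t.drop i) _ hmem
  have hz : zipCount (p.drop i) (t.drop i) = 0 := by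
    rw [drop_cons_of_lt p i hp, drop_cons_of_lt t i hti]
    simp only [zipCount]
    rw [if_neg (by simpa using Ne.symm hne)]
  rw [hz] at hle
  omega

theorem map_drop_zero (l : List (List String)) : l.map (List.drop 0) = l := by
  induction l with
  | nil => rfl
  | cons u us ih => simp [ih]

-- invariant of A's index loop
theorem cptA_go_eq (p : List String) (rest : List (List String)) (m : Nat)
    (hmp : m ≤ p.length) (hmr : ∀ t ∈ rest, m ≤ t.length) :
    ∀ i acc, cptA_go (p :: rest) m i acc =
      acc ++ (p.drop i).take (min (m - i) (Kf (p.drop i) (rest.map (List.drop i)))) := by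
  intro i acc
  induction i, acc using cptA_go.induct (p :: rest) m with
  | case1 i acc hlt token hAll ih =>
    rw [cptA_go, if_pos hlt, if_pos hAll, ih]
    have hp : i < p.length := by omega
    have hall : ∀ t ∈ rest, t.getD i "" = p.getD i "" := by
      intro t htm
      have := List.all_eq_true.mp hAll t (by simpa using htm)
      simpa [List.headD] using this
    rw [Kf_shift p rest i hp (fun t htm => lt_of_lt_of_le hlt (hmr t htm)) hall]
    rw [drop_cons_of_lt p i hp]
    have : min (m - i) (Kf (p.drop (i + 1)) (rest.map (List.drop (i + 1))) + 1)
        = min (m - (i + 1)) (Kf (p.drop (i + 1)) (rest.map (List.drop (i + 1)))) + 1 := by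
      omega
    rw [this, List.take_succ_cons, List.append_assoc]
    rfl
  | case2 i acc hlt token hAll =>
    rw [cptA_go, if_pos hlt, if_neg hAll]
    have hp : i < p.length := by omega
    have hx : ¬ ∀ t ∈ List.drop 1 (p :: rest), (t.getD i "" == token) = true :=
      fun hc => hAll (List.all_eq_true.mpr hc)
    push Not at hx
    obtain ⟨t, htm, hne⟩ := hx
    have htm' : t ∈ rest := htm
    have hne' : t.getD i "" ≠ p.getD i "" := by
      have : ¬ (t.getD i "" == p.getD i "") = true := hne
      simpa using this
    rw [Kf_zero_of_mismatch p rest i hp t htm' (lt_of_lt_of_le hlt (hmr t htm')) hne']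
    simp
  | case3 i acc hge =>
    rw [cptA_go, if_neg hge]
    have : m - i = 0 := by omega
    simp [this]

-- ===== VERDICT (by name: the statement is the Claim_ definition above) =====
theorem common_prefix_tokens_py_spec : Claim_equal_common_prefix_tokens_py := by
  intro tls _
  unfold Spec_common_prefix_tokens_py common_prefix_tokens_py common_prefix_tokens_py_alt
  cases tls with
  | nil => simp
  | cons p rest =>
    cases hmin : PySem.List.min? ((p :: rest).map (fun toks => toks.length)) (fun x => x) with
    | none =>
      have := (PySem.List.min?_eq_none_iff _ _).mp hmin
      simp at this
    | some m =>
      have hmem := PySem.List.min?_mem hmin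
      have hisMin := PySem.List.min?_isMin hmin
      have hmp : m ≤ p.length := hisMin _ (by simp)
      have hmr : ∀ t ∈ rest, m ≤ t.length := fun t ht =>
        hisMin _ (by simp; right; exact ⟨t, ht, rfl⟩)
      change cptA_go (p :: rest) m 0 [] = cptB_fold rest p
      rw [cptA_go_eq p rest m hmp hmr 0 [], cptB_fold_eq]
      simp only [List.drop_zero, Nat.sub_zero, List.nil_append, map_drop_zero]
      have hK : Kf p rest ≤ m := by
        simp only [List.mem_map] at hmem
        obtain ⟨t, htm, hteq⟩ := hmem
        rcases List.mem_cons.mp htm with h | h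
        · rw [← hteq, h]; exact Kf_le_len p rest
        · rw [← hteq]
          exact le_trans (Kf_le_mem p t rest h) (zipCount_le_right p t)
      congr 1
      omega
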